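-- pv_equiv track=rewrite | github.com/raeez/chiral-bar-cobar | compute/lib/linf_quartic_bracket.py | unshuffles
-- ===== SOURCE A (Python) =====
-- from typing import Any, Dict, List, Optional, Tuple
--
-- def unshuffles(n: int, p: int) -> List[Tuple[Tuple[int, ...], Tuple[int, ...]]]:
--     """All (p, n-p)-unshuffles of {0, 1, ..., n-1}.
--
--     An (p, q)-unshuffle is a permutation sigma of {0,...,n-1} with n=p+q
--     such that sigma(0) < sigma(1) < ... < sigma(p-1) and
--     sigma(p) < sigma(p+1) < ... < sigma(n-1).
--
--     Returns list of (first_part, second_part) tuples.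
--     """
--     from itertools import combinations
--     q = n - p
--     result = []
--     for first in combinations(range(n), p):
--         second = tuple(i for i in range(n) if i not in first)
--         result.append((first, second))
--     return result
-- ===== SOURCE B (Python) =====
-- def unshuffles(n, p):
--     """All (p, n-p)-unshuffles of {0, 1, ..., n-1}.
--
--     Iterative level-by-level construction: extend every partial partition
--     of {0,...,i-1} by placing index i into the first part (if it still has
--     room, explored first so the output stays in lexicographic order) and/or
--     into the second part (pruned when the first part can no longer reach
--     size p with the remaining indices).
--     """
--     parts = [((), ())]
--     for i in range(n):
--         new = []
--         for first, second in parts: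
--             if len(first) < p:
--                 new.append((first + (i,), second))
--             if len(first) + (n - 1 - i) >= p:
--                 new.append((first, second + (i,)))
--         parts = new
--     return [pr for pr in parts if len(pr[0]) == p]
-- ===== Notes on version B (the rewrite author's own statement) =====
-- stated objective: alternative
-- what changed: Replaced itertools.combinations plus a per-combination complement rescan with a single iterative level-by-level extension that builds both parts of every partition simultaneously (with pruning of dead prefixes), keeping the same lexicographic order.
import Mathlib
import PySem

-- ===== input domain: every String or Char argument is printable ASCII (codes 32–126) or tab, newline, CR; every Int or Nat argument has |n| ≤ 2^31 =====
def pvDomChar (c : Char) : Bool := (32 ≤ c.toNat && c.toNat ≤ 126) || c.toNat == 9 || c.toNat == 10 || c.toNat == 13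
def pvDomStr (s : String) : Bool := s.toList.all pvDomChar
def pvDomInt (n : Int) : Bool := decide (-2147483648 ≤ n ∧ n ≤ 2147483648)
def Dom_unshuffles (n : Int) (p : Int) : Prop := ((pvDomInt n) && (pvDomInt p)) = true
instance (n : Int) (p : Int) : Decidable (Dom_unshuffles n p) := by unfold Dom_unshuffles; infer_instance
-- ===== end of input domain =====

-- B replaces itertools.combinations + per-combination complement rescan by a single
-- iterative level-by-level extension building both parts at once (alternative decomposition).


-- ===== PORT A =====
-- itertools.combinations(l, r) in input order (lexicographic), ported by hand (exact)
def combs : List Int → Nat → List (List Int)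
  | _, 0 => [[]]
  | [], _ + 1 => []
  | x :: xs, r + 1 => (combs xs r).map (fun c => x :: c) ++ combs xs (r + 1)

def unshuffles (n : Int) (p : Int) : List (List Int × List Int) :=
  let rng := PySem.List.pyRange 0 n 1
  (combs rng p.toNat).foldl
    (fun result first =>
      result ++ [(first, rng.filter (fun i => !(first.contains i)))]) []

-- ===== PORT B =====
-- one level of B's loop body: extend every partial partition by index i
def stepB (n : Int) (p : Int) (i : Int) (parts : List (List Int × List Int)) :
    List (List Int × List Int) :=
  parts.foldl
    (fun new pr =>
      (new ++ (if (pr.1.length : Int) < p then [(pr.1 ++ [i], pr.2)] else [])) ++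
        (if p ≤ (pr.1.length : Int) + (n - 1 - i) then [(pr.1, pr.2 ++ [i])] else [])) []

def unshuffles_alt (n : Int) (p : Int) : List (List Int × List Int) :=
  ((PySem.List.pyRange 0 n 1).foldl (fun parts i => stepB n p i parts) [([], [])]).filter
    (fun pr => (pr.1.length : Int) == p)

-- ===== PRECONDITION & SPEC =====
-- Pre_ excludes exactly p < 0, where Python's itertools.combinations raises ValueError.
def Pre_unshuffles (n : Int) (p : Int) : Prop := 0 ≤ p
instance (n : Int) (p : Int) : Decidable (Pre_unshuffles n p) := by
  unfold Pre_unshuffles; infer_instance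
def pvWitness_unshuffles : Int × Int := (4, 2)

def Spec_unshuffles (n : Int) (p : Int) (out : List (List Int × List Int)) : Prop :=
  out = unshuffles_alt n p
instance (n : Int) (p : Int) (out : List (List Int × List Int)) :
    Decidable (Spec_unshuffles n p out) := by unfold Spec_unshuffles; infer_instance

-- ===== CLAIM (what is proved, stated in full; the proofs are below) =====
def Claim_equal_unshuffles : Prop :=
  ∀ (n : Int) (p : Int), Dom_unshuffles n p → Pre_unshuffles n p →
    Spec_unshuffles n p (unshuffles n p)

-- ===== LEMMAS AND PROOFS =====

-- the still-unplaced indices i, i+1, ..., i+k-1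
def seg : Int → Nat → List Int
  | _, 0 => []
  | i, k + 1 => i :: seg (i + 1) k

-- the final results descending from a partial partition pr when indices seg i k remain
def fF (p : Int) (i : Int) (k : Nat) (pr : List Int × List Int) :
    List (List Int × List Int) :=
  (combs (seg i k) (p - pr.1.length).toNat).map
    (fun c => (pr.1 ++ c, pr.2 ++ (seg i k).filter (fun x => !(c.contains x))))

theorem length_seg (k : Nat) : ∀ i, (seg i k).length = k := by
  induction k with
  | zero => intro i; rfl
  | succ k ih => intro i; simp [seg, ih]

theorem mem_seg {x : Int} (k : Nat) : ∀ i, x ∈ seg i k → i ≤ x := by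
  induction k with
  | zero => intro i h; simp [seg] at h
  | succ k ih =>
    intro i h
    simp [seg] at h
    rcases h with h | h
    · omega
    · have := ih (i + 1) h; omega

theorem seg_eq_pyRange (k : Nat) : ∀ i, seg i k = PySem.List.pyRange i (i + k) 1 := by
  induction k with
  | zero =>
    intro i
    rw [PySem.List.pyRange_one_eq_nil (by omega)]; rfl
  | succ k ih =>
    intro i
    rw [PySem.List.pyRange_one_cons (by omega)]
    have : (i : Int) + (k + 1 : Nat) = (i + 1) + (k : Nat) := by push_cast; ring
    rw [this]
    simp [seg, ih (i + 1)]

theorem combs_subset {x : Int} :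
    ∀ (l : List Int) (r : Nat) (c : List Int), c ∈ combs l r → x ∈ c → x ∈ l := by
  intro l
  induction l with
  | nil =>
    intro r c hc hx
    cases r with
    | zero => simp [combs] at hc; subst hc; simp at hx
    | succ r => simp [combs] at hc
  | cons y ys ih =>
    intro r c hc hx
    cases r with
    | zero =>
      simp [combs] at hc; subst hc; simp at hx
    | succ r =>
      simp only [combs, List.mem_append, List.mem_map] at hc
      rcases hc with ⟨c', hc', rfl⟩ | hc
      · rcases List.mem_cons.mp hx with rfl | hx
        · exact List.mem_cons_self
        · exact List.mem_cons_of_mem _ (ih r c' hc' hx)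
      · exact List.mem_cons_of_mem _ (ih (r + 1) c hc hx)

theorem combs_nil_of_gt : ∀ (l : List Int) (r : Nat), l.length < r → combs l r = [] := by
  intro l
  induction l with
  | nil =>
    intro r h
    cases r with
    | zero => simp at h
    | succ r => rfl
  | cons y ys ih =>
    intro r h
    cases r with
    | zero => simp at h
    | succ r =>
      simp at h
      simp [combs, ih r (by omega), ih (r + 1) (by omega)]

-- an index placed into the first part disappears from the pending complement
theorem inc_elem (pr : List Int × List Int) (i : Int) (k : Nat) (c : List Int) :
    (pr.1 ++ (i :: c), pr.2 ++ (i :: seg (i + 1) k).filter (fun x => !((i :: c).contains x)))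
      = ((pr.1 ++ [i]) ++ c, pr.2 ++ (seg (i + 1) k).filter (fun x => !(c.contains x))) := by
  have hfil : (seg (i + 1) k).filter (fun x => !((i :: c).contains x)) =
      (seg (i + 1) k).filter (fun x => !(c.contains x)) := by
    apply List.filter_congr
    intro x hx
    have hxi : i + 1 ≤ x := mem_seg k (i + 1) hx
    have hne : (x == i) = false := beq_eq_false_iff_ne.mpr (by omega)
    simp only [List.contains_cons, hne, Bool.false_or]
  have hhead : (!((i :: c).contains i)) = false := by simp
  rw [List.filter_cons, hhead]
  simp only [Bool.false_eq_true, if_false, hfil, List.append_assoc, List.singleton_append]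

-- an index placed into the second part stays at the head of the pending complement
theorem exc_elem (pr : List Int × List Int) (i : Int) (k : Nat) (c : List Int)
    (hi : i ∉ c) :
    (pr.1 ++ c, pr.2 ++ (i :: seg (i + 1) k).filter (fun x => !(c.contains x)))
      = (pr.1 ++ c, (pr.2 ++ [i]) ++ (seg (i + 1) k).filter (fun x => !(c.contains x))) := by
  have hhead : (!(c.contains i)) = true := by
    simp [List.contains_eq_mem, hi]
  rw [List.filter_cons, hhead]
  simp only [if_true, List.append_assoc, List.singleton_append]

-- the children produced by B's loop body exactly split fF (one level of the tree)
theorem children_fF (p : Int) (i : Int) (k : Nat) (pr : List Int × List Int)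
    (hle : (pr.1.length : Int) ≤ p) :
    ((if (pr.1.length : Int) < p then [(pr.1 ++ [i], pr.2)] else []) ++
      (if p ≤ (pr.1.length : Int) + (k : Int) then [(pr.1, pr.2 ++ [i])] else [])).flatMap
        (fF p (i + 1) k) = fF p i (k + 1) pr := by
  have hs : seg i (k + 1) = i :: seg (i + 1) k := rfl
  by_cases hlt : (pr.1.length : Int) < p
  · have hr : (p - (pr.1.length : Int)).toNat = (p - ((pr.1.length : Int) + 1)).toNat + 1 := by
      omega
    have hrc : (p - (((pr.1 ++ [i]).length : Nat) : Int)).toNat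
        = (p - ((pr.1.length : Int) + 1)).toNat := by
      simp only [List.length_append, List.length_cons, List.length_nil]
      push_cast
      omega
    have hinc : fF p (i + 1) k (pr.1 ++ [i], pr.2)
        = ((combs (seg (i + 1) k) ((p - ((pr.1.length : Int) + 1)).toNat)).map
            (fun c => (i :: c))).map
          (fun c => (pr.1 ++ c, pr.2 ++ (i :: seg (i + 1) k).filter (fun x => !(c.contains x)))) := by
      unfold fF
      rw [List.map_map]
      simp only [hrc]
      apply List.map_congr_left
      intro c _
      exact (inc_elem pr i k c).symm
    have hexc : fF p (i + 1) k (pr.1, pr.2 ++ [i])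
        = (combs (seg (i + 1) k) ((p - (pr.1.length : Int)).toNat)).map
          (fun c => (pr.1 ++ c, pr.2 ++ (i :: seg (i + 1) k).filter (fun x => !(c.contains x)))) := by
      unfold fF
      apply List.map_congr_left
      intro c hc
      have hi : i ∉ c := by
        intro hmem
        have := mem_seg k (i + 1) (combs_subset (seg (i + 1) k) _ c hc hmem)
        omega
      exact (exc_elem pr i k c hi).symm
    by_cases hk : p ≤ (pr.1.length : Int) + (k : Int)
    · simp only [if_pos hlt, if_pos hk, List.singleton_append, List.flatMap_cons,
        List.flatMap_nil, List.append_nil]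
      rw [hinc, hexc]
      unfold fF
      rw [hs, hr]
      simp only [combs, List.map_append]
    · simp only [if_pos hlt, if_neg hk, List.append_nil, List.flatMap_cons, List.flatMap_nil,
        List.append_nil]
      rw [hinc]
      unfold fF
      rw [hs, hr]
      simp only [combs, List.map_append]
      have hnil : combs (seg (i + 1) k) ((p - ((pr.1.length : Int) + 1)).toNat + 1) = [] := by
        apply combs_nil_of_gt
        rw [length_seg]; omega
      rw [hnil]
      simp
  · -- first part already full: only the exclude branch exists and it is forced
    have heq : (pr.1.length : Int) = p := by omega
    have hk : p ≤ (pr.1.length : Int) + (k : Int) := by omega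
    have hr0 : (p - (pr.1.length : Int)).toNat = 0 := by omega
    simp only [if_neg hlt, if_pos hk, List.nil_append, List.flatMap_cons, List.flatMap_nil,
      List.append_nil]
    unfold fF
    rw [hs, hr0]
    simp only [combs, List.map_cons, List.map_nil]
    have hfilt : ∀ l : List Int, l.filter (fun x => !(([] : List Int).contains x)) = l := by
      intro l; simp
    rw [hfilt]
    simp [seg]

-- one level of B's loop, written as a flatMap over the children
theorem stepB_eq_flatMap (n p i : Int) (parts : List (List Int × List Int)) :
    stepB n p i parts = parts.flatMap
      (fun pr => (if (pr.1.length : Int) < p then [(pr.1 ++ [i], pr.2)] else []) ++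
        (if p ≤ (pr.1.length : Int) + (n - 1 - i) then [(pr.1, pr.2 ++ [i])] else [])) := by
  unfold stepB
  have hfun : (fun (new : List (List Int × List Int)) (pr : List Int × List Int) =>
      (new ++ (if (pr.1.length : Int) < p then [(pr.1 ++ [i], pr.2)] else [])) ++
        (if p ≤ (pr.1.length : Int) + (n - 1 - i) then [(pr.1, pr.2 ++ [i])] else []))
      = (fun new pr =>
      new ++ ((if (pr.1.length : Int) < p then [(pr.1 ++ [i], pr.2)] else []) ++
        (if p ≤ (pr.1.length : Int) + (n - 1 - i) then [(pr.1, pr.2 ++ [i])] else []))) := by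
    funext new pr
    rw [List.append_assoc]
  rw [hfun]
  have := PySem.List.foldl_append_eq_flatMap
    (fun pr : List Int × List Int =>
      (if (pr.1.length : Int) < p then [(pr.1 ++ [i], pr.2)] else []) ++
        (if p ≤ (pr.1.length : Int) + (n - 1 - i) then [(pr.1, pr.2 ++ [i])] else []))
    parts ([] : List (List Int × List Int))
  simpa using this

theorem stepB_preserves (n p i : Int) (parts : List (List Int × List Int))
    (h : ∀ pr ∈ parts, (pr.1.length : Int) ≤ p) :
    ∀ pr' ∈ stepB n p i parts, (pr'.1.length : Int) ≤ p := by
  intro pr' hmem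
  rw [stepB_eq_flatMap] at hmem
  rcases List.mem_flatMap.mp hmem with ⟨pr, hpr, hin⟩
  have hle := h pr hpr
  rcases List.mem_append.mp hin with hin | hin
  · split_ifs at hin with hc
    · simp at hin; subst hin; simp; omega
    · simp at hin
  · split_ifs at hin with hc
    · simp at hin; subst hin; exact hle
    · simp at hin

theorem flatMap_congr_mem {α β : Type} {l : List α} {f g : α → List β}
    (h : ∀ x ∈ l, f x = g x) : l.flatMap f = l.flatMap g := by
  induction l with
  | nil => rfl
  | cons x xs ih =>
    simp only [List.flatMap_cons]
    rw [h x List.mem_cons_self, ih (fun y hy => h y (List.mem_cons_of_mem _ hy))]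

-- main loop invariant: folding levels i..n-1 and then collapsing with fF p n 0
-- equals collapsing the current parts with fF p i k
theorem loop_inv (n p : Int) : ∀ (k : Nat) (i : Int) (parts : List (List Int × List Int)),
    i + (k : Int) = n → (∀ pr ∈ parts, (pr.1.length : Int) ≤ p) →
    ((PySem.List.pyRange i n 1).foldl (fun acc j => stepB n p j acc) parts).flatMap (fF p n 0)
      = parts.flatMap (fF p i k) := by
  intro k
  induction k with
  | zero =>
    intro i parts hik _
    have : i = n := by omega
    subst this
    rw [PySem.List.pyRange_one_eq_nil (by omega)]
    rfl
  | succ k ih =>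
    intro i parts hik hinv
    rw [PySem.List.pyRange_one_cons (by omega)]
    simp only [List.foldl_cons]
    rw [ih (i + 1) (stepB n p i parts) (by push_cast at hik ⊢; omega)
      (stepB_preserves n p i parts hinv)]
    rw [stepB_eq_flatMap, List.flatMap_assoc]
    apply flatMap_congr_mem
    intro pr hpr
    have hcond : n - 1 - i = (k : Int) := by push_cast at hik; omega
    rw [hcond]
    exact children_fF p i k pr (hinv pr hpr)

theorem fold_preserves (n p : Int) : ∀ (l : List Int) (parts : List (List Int × List Int)),
    (∀ pr ∈ parts, (pr.1.length : Int) ≤ p) →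
    ∀ pr' ∈ l.foldl (fun acc j => stepB n p j acc) parts, (pr'.1.length : Int) ≤ p := by
  intro l
  induction l with
  | nil => intro parts h; exact h
  | cons x xs ih =>
    intro parts h
    exact ih (stepB n p x parts) (stepB_preserves n p x parts h)

-- collapsing with no indices left is exactly B's final filter
theorem flatMap_fF_zero (n p : Int) (l : List (List Int × List Int))
    (h : ∀ pr ∈ l, (pr.1.length : Int) ≤ p) :
    l.flatMap (fF p n 0) = l.filter (fun pr => (pr.1.length : Int) == p) := by
  induction l with
  | nil => rfl
  | cons pr rest ih =>
    have hle := h pr List.mem_cons_self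
    simp only [List.flatMap_cons, List.filter_cons]
    rw [ih (fun y hy => h y (List.mem_cons_of_mem _ hy))]
    by_cases hp : (pr.1.length : Int) = p
    · have hb : ((pr.1.length : Int) == p) = true := by simp [hp]
      have hr0 : (p - pr.1.length).toNat = 0 := by omega
      unfold fF
      rw [hr0]
      simp [seg, combs, hb]
    · have hb : ((pr.1.length : Int) == p) = false := by simp [hp]
      have hr1 : (p - pr.1.length).toNat = ((p - pr.1.length).toNat - 1) + 1 := by omega
      unfold fF
      rw [hr1]
      simp [seg, combs, hb]

-- ===== VERDICT (by name: the statement is the Claim_ definition above) =====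
theorem unshuffles_spec : Claim_equal_unshuffles := by
  intro n p _ hpre
  unfold Spec_unshuffles
  unfold Pre_unshuffles at hpre
  unfold unshuffles unshuffles_alt
  rw [PySem.List.foldl_append_singleton_eq_map]
  simp only [List.nil_append]
  by_cases hn : 0 ≤ n
  · have hinv : ∀ pr ∈ ([(([] : List Int), ([] : List Int))] :
        List (List Int × List Int)), (pr.1.length : Int) ≤ p := by
      intro pr hpr; simp at hpr; subst hpr; simpa using hpre
    rw [← flatMap_fF_zero n p _ (fold_preserves n p _ _ hinv)]
    rw [loop_inv n p n.toNat 0 _ (by omega) hinv]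
    simp only [List.flatMap_cons, List.flatMap_nil, List.append_nil]
    unfold fF
    have hrng : PySem.List.pyRange 0 n 1 = seg 0 n.toNat := by
      rw [seg_eq_pyRange n.toNat 0]
      congr 1
      omega
    rw [hrng]
    simp only [List.length_nil, Int.natCast_zero, Int.sub_zero, List.nil_append]
  · -- n < 0: range(n) is empty on both sides
    have hrng : PySem.List.pyRange 0 n 1 = [] :=
      PySem.List.pyRange_one_eq_nil (by omega)
    rw [hrng]
    by_cases hp0 : p = 0
    · subst hp0
      simp [combs, stepB, List.filter]
    · have hp1 : p.toNat = (p.toNat - 1) + 1 := by omega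
      rw [hp1]
      have hb : ((0 : Int) == p) = false := by
        rw [beq_eq_false_iff_ne]; omega
      simp [combs, stepB, List.filter, hb]
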